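-- pv_equiv track=rewrite | github.com/mpacione/declarative | dd/compress_l3.py | _compress_prop_rank
-- ===== SOURCE A (Python) =====
-- _PROP_RANK_STRUCTURAL = ("variant", "role", "as")
--
-- _PROP_RANK_CONTENT = (
--     "text", "label", "placeholder", "content", "value", "min", "max",
-- )
--
-- _PROP_RANK_SPATIAL = (
--     "x", "y", "width", "height",
--     "min-width", "max-width", "min-height", "max-height",
--     "layout", "gap", "padding",
--     "mainAxis", "crossAxis", "align", "constraints",
-- )
--
-- _PROP_RANK_VISUAL = (
--     "fill", "fills", "stroke", "strokes", "stroke-weight",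
--     "effects", "shadow", "radius", "opacity", "blend", "visible",
--     "font", "size", "weight", "color",
--     "line-height", "letter-spacing",
-- )
--
-- def _compress_prop_rank(key: str) -> tuple[int, str]:
--     if key.startswith("$ext."):
--         return (4, key)
--     if "." in key:
--         return (5, key)
--     for idx, bucket in enumerate((
--         _PROP_RANK_STRUCTURAL, _PROP_RANK_CONTENT,
--         _PROP_RANK_SPATIAL, _PROP_RANK_VISUAL,
--     )):
--         if key in bucket:
--             return (idx, f"{bucket.index(key):04d}")
--     return (3, "~" + key)
-- ===== SOURCE B (Python) =====
-- _PROP_RANK_STRUCTURAL = ("variant", "role", "as")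
--
-- _PROP_RANK_CONTENT = (
--     "text", "label", "placeholder", "content", "value", "min", "max",
-- )
--
-- _PROP_RANK_SPATIAL = (
--     "x", "y", "width", "height",
--     "min-width", "max-width", "min-height", "max-height",
--     "layout", "gap", "padding",
--     "mainAxis", "crossAxis", "align", "constraints",
-- )
--
-- _PROP_RANK_VISUAL = (
--     "fill", "fills", "stroke", "strokes", "stroke-weight",
--     "effects", "shadow", "radius", "opacity", "blend", "visible",
--     "font", "size", "weight", "color",
--     "line-height", "letter-spacing",
-- )
--
-- # One flat sequence of all ranked keys, plus the start offset of each bucket: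
-- # a key's bucket and in-bucket position are recovered arithmetically from its
-- # single flat index (no per-bucket scanning; keys are unique across buckets).
-- _FLAT = _PROP_RANK_STRUCTURAL + _PROP_RANK_CONTENT + _PROP_RANK_SPATIAL + _PROP_RANK_VISUAL
-- _STARTS = (0,
--            len(_PROP_RANK_STRUCTURAL),
--            len(_PROP_RANK_STRUCTURAL) + len(_PROP_RANK_CONTENT),
--            len(_PROP_RANK_STRUCTURAL) + len(_PROP_RANK_CONTENT) + len(_PROP_RANK_SPATIAL))
--
--
-- def _compress_prop_rank(key: str) -> tuple[int, str]:
--     if key.startswith("$ext."):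
--         return (4, key)
--     if "." in key:
--         return (5, key)
--     try:
--         i = _FLAT.index(key)
--     except ValueError:
--         return (3, "~" + key)
--     bucket = sum(1 for s in _STARTS if s <= i) - 1
--     return (bucket, f"{i - _STARTS[bucket]:04d}")
-- ===== Notes on version B (the rewrite author's own statement) =====
-- stated objective: alternative
-- what changed: A's enumerate-over-four-buckets loop with membership test and bucket.index is replaced by a single index search in one flat concatenation of all keys; the bucket number and in-bucket position are then recovered arithmetically from the flat index and the precomputed bucket start offsets.
import Mathlib
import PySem

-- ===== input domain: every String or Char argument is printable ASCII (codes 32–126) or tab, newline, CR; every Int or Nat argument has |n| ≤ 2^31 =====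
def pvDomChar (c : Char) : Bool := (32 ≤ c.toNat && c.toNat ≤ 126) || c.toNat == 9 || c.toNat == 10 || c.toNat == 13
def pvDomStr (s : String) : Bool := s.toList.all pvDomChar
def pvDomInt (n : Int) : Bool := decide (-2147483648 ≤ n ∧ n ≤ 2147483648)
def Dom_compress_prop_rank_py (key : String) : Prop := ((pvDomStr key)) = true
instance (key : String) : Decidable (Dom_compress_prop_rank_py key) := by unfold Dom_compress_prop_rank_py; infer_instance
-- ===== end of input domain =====

-- B replaces A's per-bucket scan (membership test + bucket.index in each of four tuples)
-- by ONE search in a flat concatenation of all keys, recovering bucket and in-bucket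
-- position arithmetically from the flat index and the bucket start offsets (objective: alternative).

-- module constants shared by both Pythons
def PROP_RANK_STRUCTURAL : List String := ["variant", "role", "as"]
def PROP_RANK_CONTENT : List String :=
  ["text", "label", "placeholder", "content", "value", "min", "max"]
def PROP_RANK_SPATIAL : List String :=
  ["x", "y", "width", "height",
   "min-width", "max-width", "min-height", "max-height",
   "layout", "gap", "padding",
   "mainAxis", "crossAxis", "align", "constraints"]
def PROP_RANK_VISUAL : List String :=
  ["fill", "fills", "stroke", "strokes", "stroke-weight",
   "effects", "shadow", "radius", "opacity", "blend", "visible",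
   "font", "size", "weight", "color",
   "line-height", "letter-spacing"]

-- f"{n:04d}" for n ≥ 0 (hand-ported: zero-pad str(n) to width 4; exact for 0 ≤ n)
def fmt04 (n : Int) : String :=
  let s := PySem.Int.toChars n
  String.ofList (List.replicate (4 - s.length) '0' ++ s)

-- ===== PORT A =====
-- the 'for idx, bucket in enumerate(...)' loop, over the explicitly enumerated buckets;
-- bucket.index(key) is guarded by 'key in bucket', so index? never misses (getD 0 unreachable)
def compress_prop_rank_loop (key : String) : List (Int × List String) → Int × String
  | [] => (3, "~" ++ key)
  | (idx, bucket) :: rest =>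
      if key ∈ bucket then (idx, fmt04 ((PySem.List.index? bucket key).getD 0))
      else compress_prop_rank_loop key rest

def compress_prop_rank_py (key : String) : Int × String :=
  if PySem.Str.startswith key "$ext." then (4, key)
  else if PySem.Str.isIn "." key then (5, key)
  else compress_prop_rank_loop key
    [(0, PROP_RANK_STRUCTURAL), (1, PROP_RANK_CONTENT),
     (2, PROP_RANK_SPATIAL), (3, PROP_RANK_VISUAL)]

-- ===== PORT B =====
-- the module-level flat list and bucket start offsets of Source B
def PROP_RANK_FLAT : List String :=
  PROP_RANK_STRUCTURAL ++ PROP_RANK_CONTENT ++ PROP_RANK_SPATIAL ++ PROP_RANK_VISUAL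
def PROP_RANK_STARTS : List Int :=
  [0, (PROP_RANK_STRUCTURAL.length : Int),
   (PROP_RANK_STRUCTURAL.length + PROP_RANK_CONTENT.length : Int),
   (PROP_RANK_STRUCTURAL.length + PROP_RANK_CONTENT.length + PROP_RANK_SPATIAL.length : Int)]

def compress_prop_rank_py_alt (key : String) : Int × String :=
  if PySem.Str.startswith key "$ext." then (4, key)
  else if PySem.Str.isIn "." key then (5, key)
  else
    match PySem.List.index? PROP_RANK_FLAT key with    -- try _FLAT.index(key) / except ValueError
    | none => (3, "~" ++ key)
    | some i =>
        -- bucket = sum(1 for s in _STARTS if s <= i) - 1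
        let bucket : Int :=
          (PROP_RANK_STARTS.foldl (fun acc s => if s ≤ (i : Int) then acc + 1 else acc) 0) - 1
        (bucket, fmt04 ((i : Int) - (PySem.List.pyGet? PROP_RANK_STARTS bucket).getD 0))

-- ===== PRECONDITION & SPEC =====
def Spec_compress_prop_rank_py (key : String) (out : Int × String) : Prop := out = compress_prop_rank_py_alt key
instance (key : String) (out : Int × String) : Decidable (Spec_compress_prop_rank_py key out) := by unfold Spec_compress_prop_rank_py; infer_instance

-- ===== CLAIM (what is proved, stated in full; the proofs are below) =====
def Claim_equal_compress_prop_rank_py : Prop := ∀ (key : String), Dom_compress_prop_rank_py key → Spec_compress_prop_rank_py key (compress_prop_rank_py key)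

-- ===== LEMMAS AND PROOFS =====

set_option maxRecDepth 8192 in
lemma core_eq (key : String) :
    compress_prop_rank_loop key
      [(0, PROP_RANK_STRUCTURAL), (1, PROP_RANK_CONTENT),
       (2, PROP_RANK_SPATIAL), (3, PROP_RANK_VISUAL)]
      = (match PySem.List.index? PROP_RANK_FLAT key with
         | none => ((3 : Int), "~" ++ key)
         | some i =>
             let bucket : Int :=
               (PROP_RANK_STARTS.foldl (fun acc s => if s ≤ (i : Int) then acc + 1 else acc) 0) - 1
             (bucket, fmt04 ((i : Int) - (PySem.List.pyGet? PROP_RANK_STARTS bucket).getD 0))) := by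
  by_cases h : key ∈ PROP_RANK_FLAT
  · fin_cases h <;> decide
  · have hidx : List.idxOf? key PROP_RANK_FLAT = none := by
      rw [← PySem.List.index?_eq_idxOf?]
      exact (PySem.List.index?_eq_none_iff _ _).2 h
    have h1 : key ∉ PROP_RANK_STRUCTURAL := fun hm => h (by simp [PROP_RANK_FLAT, hm])
    have h2 : key ∉ PROP_RANK_CONTENT := fun hm => h (by simp [PROP_RANK_FLAT, hm])
    have h3 : key ∉ PROP_RANK_SPATIAL := fun hm => h (by simp [PROP_RANK_FLAT, hm])
    have h4 : key ∉ PROP_RANK_VISUAL := fun hm => h (by simp [PROP_RANK_FLAT, hm])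
    simp [compress_prop_rank_loop, h1, h2, h3, h4, hidx]

-- ===== VERDICT (by name: the statement is the Claim_ definition above) =====
theorem compress_prop_rank_py_spec : Claim_equal_compress_prop_rank_py := by
  intro key _
  show compress_prop_rank_py key = compress_prop_rank_py_alt key
  unfold compress_prop_rank_py compress_prop_rank_py_alt
  split_ifs <;> first | exact core_eq key | rfl
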